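-- pv_equiv track=rewrite | github.com/jernejjanez/advent-of-code | 2023/day-13/day13.py | part_two
-- ===== SOURCE A (Python) =====
-- def can_fix_smudge(line1, line2):
--     for i, (c1, c2) in enumerate(zip(line1, line2)):
--         if c1 != c2:
--             new_line1 = line1[:i] + c2 + line1[i + 1:]
--             if new_line1 == line2:
--                 return True
--             return False
--     return False
--
-- def is_reflection_possible(pattern, y1, y2, should_fix_smudge):
--     smudge_fixed = False
--     while 0 <= y1 and y2 < len(pattern):
--         if pattern[y1] == pattern[y2]:
--             y1 -= 1
--             y2 += 1
--         elif should_fix_smudge: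
--             if smudge_fixed:
--                 return False, False
--             if can_fix_smudge(pattern[y1], pattern[y2]):
--                 y1 -= 1
--                 y2 += 1
--                 smudge_fixed = True
--             else:
--                 return False, False
--         else:
--             return False, False
--     return True, smudge_fixed
--
-- def find_reflection(pattern, multiplication, should_fix_smudge):
--     reflection_possible = False
--     line_of_reflection = 0
--     fixed_smudge = False
--     for y in range(len(pattern)):
--         if y == len(pattern) - 1:
--             break
--         reflection_possible, fixed_smudge = is_reflection_possible(pattern, y, y + 1, should_fix_smudge)
--         if should_fix_smudge and not fixed_smudge:
--             continue
--         if reflection_possible: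
--             line_of_reflection = y + 1
--             break
--     if should_fix_smudge:
--         if reflection_possible and fixed_smudge:
--             return True, multiplication * line_of_reflection
--     elif reflection_possible:
--         return True, multiplication * line_of_reflection
--     return False, 0
--
-- def part_two(_input):
--     _sum = 0
--     for pattern in _input:
--         has_horizontal_reflection, value = find_reflection(pattern, 100, True)
--         if has_horizontal_reflection:
--             _sum += value
--         else:
--             pattern = [''.join(list(i)[::-1]) for i in zip(*pattern)]
--             has_vertical_reflection, value = find_reflection(pattern, 1, True)
--             if has_vertical_reflection:
--                 _sum += value
--     return _sum
-- ===== SOURCE B (Python) =====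
-- def part_two(_input):
--     total = 0
--     for pattern in _input:
--         h = _mirror(pattern)
--         if h:
--             total += 100 * h
--         else:
--             total += _mirror([''.join(list(i)[::-1]) for i in zip(*pattern)])
--     return total
--
--
-- def _diff(r1, r2):
--     # 2 if the rows cannot be reconciled by lengths, else their Hamming distance
--     if len(r1) != len(r2):
--         return 2
--     return sum(a != b for a, b in zip(r1, r2))
--
--
-- def _mirror(pattern):
--     # anti-diagonal sums of the pairwise row-difference matrix, built in one pass:
--     # the split before row y+1 mirrors exactly the row pairs (i, j) with i + j = 2*y + 1,
--     # so it is a smudged reflection iff diag[2*y + 1] == 1.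
--     n = len(pattern)
--     diag = [0] * (2 * n)
--     for i in range(n):
--         for j in range(i + 1, n):
--             diag[i + j] += _diff(pattern[i], pattern[j])
--     for y in range(n - 1):
--         if diag[2 * y + 1] == 1:
--             return y + 1
--     return 0
-- ===== Notes on version B (the rewrite author's own statement) =====
-- stated objective: alternative
-- what changed: A threads a mutable smudge-fixed flag through an outward-expanding while-loop per candidate line (with a slice-rebuild one-char-fix test); B never expands around a candidate: it builds, in one double pass over all row pairs, the anti-diagonal sums of the pairwise row-difference matrix (diag[i+j] += hamming-or-2), then returns the first split y+1 whose odd anti-diagonal sum diag[2y+1] is exactly 1; the transpose fallback and x100/x1 multipliers are kept.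
import Mathlib
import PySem

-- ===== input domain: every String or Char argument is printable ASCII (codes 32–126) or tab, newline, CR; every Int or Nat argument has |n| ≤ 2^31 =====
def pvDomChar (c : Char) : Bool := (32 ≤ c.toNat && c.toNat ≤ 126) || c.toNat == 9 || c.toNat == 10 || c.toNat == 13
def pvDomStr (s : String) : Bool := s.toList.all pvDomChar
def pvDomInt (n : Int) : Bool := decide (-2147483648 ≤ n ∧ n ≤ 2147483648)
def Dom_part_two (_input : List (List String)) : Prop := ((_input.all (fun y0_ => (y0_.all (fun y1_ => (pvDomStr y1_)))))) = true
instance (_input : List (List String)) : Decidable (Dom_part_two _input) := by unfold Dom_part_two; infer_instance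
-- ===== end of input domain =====

-- B replaces A's per-line outward expansion with a mutable smudge flag by a global table:
-- one double pass over all row pairs accumulates anti-diagonal sums diag[i+j] of the
-- pairwise row-difference matrix, then the scan just looks for the first diag[2y+1] = 1
-- (objective: alternative decomposition; same behaviour, rows handled as lists of chars).

-- ===== PORT A =====
-- rows are handled as List Char (String ↔ List Char; '==' on rows = Python str equality)

-- enumerate(zip(line1, line2)) with the slice-rebuild at the first mismatch
def pvCfsAux : List Char → List Char → Nat → List Char → List Char → Bool
  | c1 :: r1, c2 :: r2, i, orig1, line2 =>
    if c1 ≠ c2 then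
      ((orig1.take i ++ [c2] ++ orig1.drop (i + 1)) == line2)
    else pvCfsAux r1 r2 (i + 1) orig1 line2
  | _, _, _, _, _ => false

def can_fix_smudge (line1 line2 : List Char) : Bool :=
  pvCfsAux line1 line2 0 line1 line2

def is_reflection_possible (pattern : List (List Char)) (y1 : Int) (y2 : Nat)
    (should_fix_smudge smudge_fixed : Bool) : Bool × Bool :=
  if h : 0 ≤ y1 ∧ y2 < pattern.length then
    if pattern[y1.toNat]?.getD [] == pattern[y2]?.getD [] then
      is_reflection_possible pattern (y1 - 1) (y2 + 1) should_fix_smudge smudge_fixed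
    else if should_fix_smudge then
      if smudge_fixed then (false, false)
      else if can_fix_smudge (pattern[y1.toNat]?.getD []) (pattern[y2]?.getD []) then
        is_reflection_possible pattern (y1 - 1) (y2 + 1) should_fix_smudge true
      else (false, false)
    else (false, false)
  else (true, smudge_fixed)
termination_by pattern.length - y2
decreasing_by all_goals omega

-- the for-y loop of find_reflection, state (reflection_possible, fixed_smudge, line_of_reflection)
def pvFrLoop (pattern : List (List Char)) (sfs : Bool) (y : Nat) (rp fs : Bool) (lor : Nat) :
    Bool × Bool × Nat :=
  if y < pattern.length then
    if y = pattern.length - 1 then (rp, fs, lor)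
    else
      let r := is_reflection_possible pattern (y : Int) (y + 1) sfs false
      if sfs && !r.2 then pvFrLoop pattern sfs (y + 1) r.1 r.2 lor
      else if r.1 then (r.1, r.2, y + 1)
      else pvFrLoop pattern sfs (y + 1) r.1 r.2 lor
  else (rp, fs, lor)
termination_by pattern.length - y
decreasing_by all_goals omega

def find_reflection (pattern : List (List Char)) (multiplication : Int) (should_fix_smudge : Bool) :
    Bool × Int :=
  let r := pvFrLoop pattern should_fix_smudge 0 false false 0
  if should_fix_smudge then
    if r.1 && r.2.1 then (true, multiplication * (r.2.2 : Int)) else (false, 0)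
  else if r.1 then (true, multiplication * (r.2.2 : Int))
  else (false, 0)

-- zip(*pattern) (truncating to the shortest row), fueled by the first row's length
def pvZipStarF : Nat → List (List Char) → List (List Char)
  | 0, _ => []
  | fuel + 1, rows =>
    if rows.isEmpty || rows.any (·.isEmpty) then []
    else (rows.map (fun r => r.headD ' ')) :: pvZipStarF fuel (rows.map List.tail)

-- [''.join(list(i)[::-1]) for i in zip(*pattern)]  (shared verbatim by both Pythons)
def pvTransposeRev (pattern : List (List Char)) : List (List Char) :=
  (pvZipStarF ((pattern.headD []).length) pattern).map List.reverse

def part_two (_input : List (List String)) : Int :=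
  _input.foldl (fun _sum patternS =>
    let pattern := patternS.map String.toList
    let rh := find_reflection pattern 100 true
    if rh.1 then _sum + rh.2
    else
      let pattern2 := pvTransposeRev pattern
      let rv := find_reflection pattern2 1 true
      if rv.1 then _sum + rv.2 else _sum) 0

-- ===== PORT B =====
-- _diff: 2 if the rows cannot be reconciled by lengths, else their Hamming distance
def pvDiff (r1 r2 : List Char) : Nat :=
  if r1.length != r2.length then 2
  else (r1.zip r2).countP (fun p => p.1 != p.2)

-- diag[k] += v
def pvBump (d : List Nat) (k v : Nat) : List Nat :=
  d.set k (d.getD k 0 + v)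

-- for i in range(n): for j in range(i+1, n): diag[i+j] += _diff(pattern[i], pattern[j])
def pvDiagBuild (pattern : List (List Char)) : List Nat :=
  (List.range pattern.length).foldl
    (fun d i =>
      (List.range' (i + 1) (pattern.length - (i + 1))).foldl
        (fun d j => pvBump d (i + j) (pvDiff (pattern[i]?.getD []) (pattern[j]?.getD []))) d)
    (List.replicate (2 * pattern.length) 0)

-- first y in range(n-1) with diag[2y+1] == 1 (the loop-with-return, as find?)
def pvMirror (pattern : List (List Char)) : Nat :=
  let diag := pvDiagBuild pattern
  match (List.range (pattern.length - 1)).find? (fun y => diag.getD (2 * y + 1) 0 == 1) with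
  | some y => y + 1
  | none => 0

def part_two_alt (_input : List (List String)) : Int :=
  _input.foldl (fun total patternS =>
    let pattern := patternS.map String.toList
    let h := pvMirror pattern
    if h ≠ 0 then total + 100 * (h : Int)
    else total + (pvMirror (pvTransposeRev pattern) : Int)) 0

-- ===== PRECONDITION & SPEC =====
def Spec_part_two (_input : List (List String)) (out : Int) : Prop := out = part_two_alt _input
instance (_input : List (List String)) (out : Int) : Decidable (Spec_part_two _input out) := by unfold Spec_part_two; infer_instance

-- ===== CLAIM (what is proved, stated in full; the proofs are below) =====
def Claim_equal_part_two : Prop := ∀ (_input : List (List String)), Dom_part_two _input → Spec_part_two _input (part_two _input)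

-- ===== LEMMAS AND PROOFS =====

-- mismatch count over zip, the measure underlying both sides
def pvMis (a b : List Char) : Nat := (a.zip b).countP (fun p => p.1 != p.2)

-- structural version of A's can_fix_smudge (invariant: equal prefixes already consumed)
def pvCfsSimp : List Char → List Char → Bool
  | c1 :: r1, c2 :: r2 => if c1 ≠ c2 then r1 == r2 else pvCfsSimp r1 r2
  | _, _ => false

-- A's per-pair cost: 0 identical, 1 one-char fixable, 2 irreconcilable
def pvPairCost (r1 r2 : List Char) : Nat :=
  if r1 == r2 then 0 else if can_fix_smudge r1 r2 then 1 else 2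

-- running total of capped pair costs along A's while-loop trajectory
def pvTsum (pattern : List (List Char)) (y1 : Int) (y2 : Nat) : Nat :=
  if h : 0 ≤ y1 ∧ y2 < pattern.length then
    pvPairCost (pattern[y1.toNat]?.getD []) (pattern[y2]?.getD []) + pvTsum pattern (y1 - 1) (y2 + 1)
  else 0
termination_by pattern.length - y2
decreasing_by all_goals omega

-- the same trajectory with B's uncapped pvDiff
def pvUsum (pattern : List (List Char)) (y1 : Int) (y2 : Nat) : Nat :=
  if h : 0 ≤ y1 ∧ y2 < pattern.length then
    pvDiff (pattern[y1.toNat]?.getD []) (pattern[y2]?.getD []) + pvUsum pattern (y1 - 1) (y2 + 1)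
  else 0
termination_by pattern.length - y2
decreasing_by all_goals omega

-- canonical scan: first split y with capped trajectory sum 1
def pvRef (pattern : List (List Char)) (y : Nat) : Nat :=
  if y < pattern.length - 1 then
    if pvTsum pattern (y : Int) (y + 1) = 1 then y + 1 else pvRef pattern (y + 1)
  else 0
termination_by pattern.length - 1 - y
decreasing_by all_goals omega

theorem pvEqb_char : ∀ a b : List Char, (a == b) = (a.length == b.length && pvMis a b == 0) := by
  intro a
  induction a with
  | nil => intro b; cases b <;> simp [pvMis]
  | cons c1 r1 ih =>
      intro b
      cases b with
      | nil => simp [pvMis]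
      | cons c2 r2 =>
          by_cases h : c1 = c2
          · simpa [pvMis, List.countP_cons, h] using ih r2
          · simp [pvMis, List.countP_cons, h]

theorem pvCfsSimp_char : ∀ a b : List Char, pvCfsSimp a b = (a.length == b.length && pvMis a b == 1) := by
  intro a
  induction a with
  | nil => intro b; cases b <;> simp [pvCfsSimp, pvMis]
  | cons c1 r1 ih =>
      intro b
      cases b with
      | nil => simp [pvCfsSimp, pvMis]
      | cons c2 r2 =>
          by_cases h : c1 = c2
          · simpa [pvCfsSimp, pvMis, List.countP_cons, h] using ih r2
          · simpa [pvCfsSimp, pvMis, List.countP_cons, h] using pvEqb_char r1 r2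

theorem pvCfsAux_eq : ∀ (r1 r2 pre : List Char),
    pvCfsAux r1 r2 pre.length (pre ++ r1) (pre ++ r2) = pvCfsSimp r1 r2 := by
  intro r1
  induction r1 with
  | nil => intro r2 pre; cases r2 <;> rfl
  | cons c1 t1 ih =>
      intro r2 pre
      cases r2 with
      | nil => rfl
      | cons c2 t2 =>
          by_cases h : c1 = c2
          · subst h
            simpa [pvCfsAux, pvCfsSimp, List.append_assoc] using ih t2 (pre ++ [c1])
          · have htake : (pre ++ c1 :: t1).take pre.length = pre := by
              simpa using List.take_left pre (c1 :: t1)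
            have hdrop : (pre ++ c1 :: t1).drop (pre.length + 1) = t1 := by
              rw [List.append_cons]
              have hl : (pre ++ [c1]).length = pre.length + 1 := by simp
              rw [← hl, List.drop_left]
            simp [pvCfsAux, pvCfsSimp, h, htake, hdrop]

theorem pvCfs_char (a b : List Char) :
    can_fix_smudge a b = (a.length == b.length && pvMis a b == 1) := by
  have := pvCfsAux_eq a b []
  simpa [can_fix_smudge, pvCfsSimp_char] using this

-- A's capped cost is B's pvDiff capped at 2
theorem pvCost_min (a b : List Char) : pvPairCost a b = min (pvDiff a b) 2 := by
  rw [pvPairCost, pvEqb_char, pvCfs_char, pvDiff]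
  by_cases hl : a.length = b.length
  · simp only [hl, bne_self_eq_false, Bool.false_eq_true, if_false, beq_self_eq_true,
      Bool.true_and]
    have : (a.zip b).countP (fun p => p.1 != p.2) = pvMis a b := rfl
    rw [this]
    by_cases h0 : pvMis a b = 0
    · simp [h0]
    · by_cases h1 : pvMis a b = 1
      · simp [h0, h1]
      · simp only [beq_iff_eq, h0, h1, if_false]
        omega
  · have : (a.length == b.length) = false := by simpa using hl
    simp [this, bne, hl]

-- capped-sum vs uncapped-sum: both 0 together and both 1 together
theorem pvCap_sum (pattern : List (List Char)) :
    ∀ (m y2 : Nat) (y1 : Int), pattern.length - y2 ≤ m →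
      (pvTsum pattern y1 y2 = 0 ↔ pvUsum pattern y1 y2 = 0) ∧
      (pvTsum pattern y1 y2 = 1 ↔ pvUsum pattern y1 y2 = 1) := by
  intro m
  induction m with
  | zero =>
      intro y2 y1 hm
      have hg : ¬ (0 ≤ y1 ∧ y2 < pattern.length) := by omega
      rw [pvTsum, pvUsum, dif_neg hg, dif_neg hg]
      omega
  | succ m ih =>
      intro y2 y1 hm
      rw [pvTsum, pvUsum]
      by_cases hg : 0 ≤ y1 ∧ y2 < pattern.length
      · rw [dif_pos hg, dif_pos hg, pvCost_min]
        have := ih (y2 + 1) (y1 - 1) (by omega)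
        omega
      · rw [dif_neg hg, dif_neg hg]
        omega

-- A's while-loop as a function of the capped trajectory sum
theorem pvIrp_eq (pattern : List (List Char)) :
    ∀ (m y2 : Nat) (y1 : Int) (sf : Bool), pattern.length - y2 ≤ m →
    is_reflection_possible pattern y1 y2 true sf =
      (if pvTsum pattern y1 y2 = 0 then (true, sf)
       else if sf then (false, false)
       else if pvTsum pattern y1 y2 = 1 then (true, true)
       else (false, false)) := by
  intro m
  induction m with
  | zero =>
      intro y2 y1 sf hm
      have hg : ¬ (0 ≤ y1 ∧ y2 < pattern.length) := by omega
      rw [is_reflection_possible, pvTsum, dif_neg hg, dif_neg hg]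
      simp
  | succ m ih =>
      intro y2 y1 sf hm
      rw [is_reflection_possible, pvTsum]
      by_cases hg : 0 ≤ y1 ∧ y2 < pattern.length
      · rw [dif_pos hg, dif_pos hg, pvPairCost]
        by_cases heq : (pattern[y1.toNat]?.getD [] == pattern[y2]?.getD []) = true
        · rw [if_pos heq, if_pos heq, ih (y2 + 1) (y1 - 1) sf (by omega)]
          norm_num
        · rw [if_neg heq, if_neg heq]
          set t := pvTsum pattern (y1 - 1) (y2 + 1) with ht
          by_cases hfix : can_fix_smudge (pattern[y1.toNat]?.getD []) (pattern[y2]?.getD []) = true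
          · simp only [if_pos hfix]
            cases sf with
            | false =>
                rw [ih (y2 + 1) (y1 - 1) true (by omega), ← ht]
                by_cases h0 : t = 0
                · simp [h0]
                · simp [h0, show ¬(1 + t = 0) by omega, show ¬(1 + t = 1) by omega]
            | true => simp [show ¬(1 + t = 0) by omega]
          · simp only [if_neg hfix]
            cases sf <;>
              simp [show ¬(2 + t = 0) by omega, show ¬(2 + t = 1) by omega]
      · rw [dif_neg hg, dif_neg hg]
        simp

theorem pvFrl (pattern : List (List Char)) :
    ∀ (m y : Nat) (rp fs : Bool) (lor : Nat), pattern.length - y ≤ m → (rp && fs) = false →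
    ((pvFrLoop pattern true y rp fs lor).1 && (pvFrLoop pattern true y rp fs lor).2.1)
        = (pvRef pattern y != 0)
    ∧ (((pvFrLoop pattern true y rp fs lor).1 && (pvFrLoop pattern true y rp fs lor).2.1) = true →
        (pvFrLoop pattern true y rp fs lor).2.2 = pvRef pattern y) := by
  intro m
  induction m with
  | zero =>
      intro y rp fs lor hm hrf
      have h1 : ¬ y < pattern.length := by omega
      have h2 : ¬ y < pattern.length - 1 := by omega
      rw [pvFrLoop, pvRef]
      simp [h1, h2, hrf]
  | succ m ih =>
      intro y rp fs lor hm hrf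
      rw [pvFrLoop, pvRef]
      by_cases h1 : y < pattern.length
      · by_cases h2 : y = pattern.length - 1
        · have h3 : ¬ y < pattern.length - 1 := by omega
          simp [h1, h2, h3, hrf]
        · have h3 : y < pattern.length - 1 := by omega
          simp only [if_pos h1, if_neg h2, if_pos h3]
          rw [pvIrp_eq pattern (pattern.length - (y + 1)) (y + 1) (y : Int) false (by omega)]
          by_cases h0 : pvTsum pattern (y : Int) (y + 1) = 0
          · have hb : ¬ pvTsum pattern (y : Int) (y + 1) = 1 := by omega
            simp only [h0, if_pos rfl]
            simpa [hb] using ih (y + 1) true false lor (by omega) (by simp)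
          · by_cases hone : pvTsum pattern (y : Int) (y + 1) = 1
            · simp [h0, hone]
            · simp only [if_neg h0, if_neg hone, if_neg (Bool.false_ne_true)]
              simpa [hone] using ih (y + 1) false false lor (by omega) (by simp)
      · have h2 : ¬ y < pattern.length - 1 := by omega
        rw [if_neg h1, if_neg h2]
        simp [hrf]

theorem pvFr_eq (pattern : List (List Char)) (mult : Int) :
    find_reflection pattern mult true =
      (if pvRef pattern 0 = 0 then (false, 0) else (true, mult * (pvRef pattern 0 : Int))) := by
  obtain ⟨hA, hB⟩ := pvFrl pattern pattern.length 0 false false 0 (by omega) (by simp)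
  by_cases h0 : pvRef pattern 0 = 0
  · have hf : ((pvFrLoop pattern true 0 false false 0).1 &&
        (pvFrLoop pattern true 0 false false 0).2.1) = false := by
      rw [hA]; simp [h0]
    simp [find_reflection, hf, h0]
  · have hT : ((pvFrLoop pattern true 0 false false 0).1 &&
        (pvFrLoop pattern true 0 false false 0).2.1) = true := by
      rw [hA]; simp [h0]
    simp [find_reflection, hT, h0, hB hT]

-- ---- B side: the diag table realises the uncapped trajectory sums ----

-- sum of the values attached to key k in an update list
def pvKeySum (k : Nat) : List (Nat × Nat) → Nat
  | [] => 0
  | p :: t => (if p.1 = k then p.2 else 0) + pvKeySum k t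

theorem pvKeySum_append (k : Nat) : ∀ l1 l2 : List (Nat × Nat),
    pvKeySum k (l1 ++ l2) = pvKeySum k l1 + pvKeySum k l2 := by
  intro l1 l2
  induction l1 with
  | nil => simp [pvKeySum]
  | cons p t ih => simp [pvKeySum, ih]; omega

-- nested foldl = foldl over the flattened update list
theorem pvFoldl_flatMap {α β γ : Type} (f : γ → β → γ) (g : α → List β) :
    ∀ (l : List α) (d : γ), l.foldl (fun d a => (g a).foldl f d) d = (l.flatMap g).foldl f d := by
  intro l
  induction l with
  | nil => intro d; rfl
  | cons a t ih => intro d; simp [List.flatMap_cons, List.foldl_append, ih]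

-- folding pvBump reads back as initial value plus the key sum
theorem pvBump_foldl (k : Nat) :
    ∀ (ups : List (Nat × Nat)) (d : List Nat), k < d.length →
      (∀ p ∈ ups, p.1 < d.length) →
      (ups.foldl (fun d p => pvBump d p.1 p.2) d).getD k 0 = d.getD k 0 + pvKeySum k ups := by
  intro ups
  induction ups with
  | nil => intro d _ _; simp [pvKeySum]
  | cons p t ih =>
      intro d hk hmem
      have hp : p.1 < d.length := hmem p (by simp)
      have hlen : (pvBump d p.1 p.2).length = d.length := by simp [pvBump]
      have h1 : (pvBump d p.1 p.2).getD k 0 = d.getD k 0 + (if p.1 = k then p.2 else 0) := by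
        by_cases he : p.1 = k
        · subst he
          simp [pvBump, List.getD, List.getElem?_set, hp]
        · simp [pvBump, List.getD, List.getElem?_set, he]
      rw [List.foldl_cons, ih (pvBump d p.1 p.2) (by omega) (by intro q hq; rw [hlen]; exact hmem q (by simp [hq])), h1, pvKeySum]
      omega

-- the flat update list of pvDiagBuild
def pvUps (pattern : List (List Char)) : List (Nat × Nat) :=
  (List.range pattern.length).flatMap (fun i =>
    (List.range' (i + 1) (pattern.length - (i + 1))).map
      (fun j => (i + j, pvDiff (pattern[i]?.getD []) (pattern[j]?.getD []))))

theorem pvDiagBuild_eq (pattern : List (List Char)) :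
    pvDiagBuild pattern =
      (pvUps pattern).foldl (fun d p => pvBump d p.1 p.2)
        (List.replicate (2 * pattern.length) 0) := by
  rw [pvDiagBuild, pvUps, ← pvFoldl_flatMap]
  congr 1
  funext d i
  rw [List.foldl_map]

theorem pvUps_mem (pattern : List (List Char)) :
    ∀ p ∈ pvUps pattern, p.1 < 2 * pattern.length := by
  intro p hp
  rw [pvUps, List.mem_flatMap] at hp
  obtain ⟨i, hi, hpi⟩ := hp
  rw [List.mem_map] at hpi
  obtain ⟨j, hj, hpj⟩ := hpi
  rw [List.mem_range'] at hj
  rw [List.mem_range] at hi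
  obtain ⟨_, h2⟩ := hj
  subst hpj
  simp only
  omega

-- key sum of one row of updates: at most one j hits key k
theorem pvKeySum_row (k i : Nat) (c : Nat → Nat) :
    ∀ (m s : Nat),
      pvKeySum k ((List.range' s m).map (fun j => (i + j, c j))) =
        if i + s ≤ k ∧ k < i + s + m then c (k - i) else 0 := by
  intro m
  induction m with
  | zero => intro s; simp [pvKeySum]
  | succ m ih =>
      intro s
      rw [List.range'_succ, List.map_cons, pvKeySum, ih (s + 1)]
      have h4 : i + (s + 1) = i + s + 1 := by ring
      rw [h4]
      by_cases he : i + s = k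
      · have h2 : ¬ (i + s + 1 ≤ k ∧ k < i + s + 1 + m) := by omega
        rw [if_neg h2, if_pos (show i + s ≤ k ∧ k < i + s + (m + 1) by omega)]
        have hs : k - i = s := by omega
        simp [he, hs]
      · have h1 : ¬ ((i + s, c s).1 = k) := by simpa using he
        rw [if_neg h1]
        by_cases h : i + s + 1 ≤ k ∧ k < i + s + 1 + m
        · rw [if_pos h, if_pos (show i + s ≤ k ∧ k < i + s + (m + 1) by omega)]
          simp
        · rw [if_neg h, if_neg (show ¬ (i + s ≤ k ∧ k < i + s + (m + 1)) by omega)]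

-- prefix sums of the per-row key sums, for keys k over rows i < m
def pvFF (pattern : List (List Char)) (k : Nat) : Nat → Nat
  | 0 => 0
  | m + 1 => pvFF pattern k m +
      (if m + (m + 1) ≤ k ∧ k < m + (m + 1) + (pattern.length - (m + 1)) then
        pvDiff (pattern[m]?.getD []) (pattern[(k - m)]?.getD []) else 0)

theorem pvKeySum_ups (pattern : List (List Char)) (k : Nat) :
    ∀ m : Nat, pvKeySum k ((List.range m).flatMap (fun i =>
        (List.range' (i + 1) (pattern.length - (i + 1))).map
          (fun j => (i + j, pvDiff (pattern[i]?.getD []) (pattern[j]?.getD []))))) =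
      pvFF pattern k m := by
  intro m
  induction m with
  | zero => simp [pvKeySum, pvFF]
  | succ m ih =>
      rw [List.range_succ, List.flatMap_append, pvKeySum_append, ih]
      simp only [List.flatMap_cons, List.flatMap_nil, List.append_nil]
      rw [pvKeySum_row k m (fun j => pvDiff (pattern[m]?.getD []) (pattern[j]?.getD []))]
      simp [pvFF]

-- anti-diagonal partial sums, trajectory-style: rows i < m paired with row 2y+1-i
def pvGG (pattern : List (List Char)) (y : Nat) : Nat → Nat
  | 0 => 0
  | m + 1 => pvGG pattern y m +
      (if 2 * y + 1 < m + pattern.length then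
        pvDiff (pattern[m]?.getD []) (pattern[(2 * y + 1 - m)]?.getD []) else 0)

theorem pvGG_zero (pattern : List (List Char)) (y : Nat) :
    ∀ m : Nat, (∀ i < m, ¬ (2 * y + 1 < i + pattern.length)) → pvGG pattern y m = 0 := by
  intro m
  induction m with
  | zero => intro _; rfl
  | succ m ih =>
      intro h
      rw [pvGG, ih (fun i hi => h i (by omega)), if_neg (h m (by omega))]

theorem pvFF_stable (pattern : List (List Char)) (y : Nat) :
    ∀ m : Nat, y + 1 ≤ m → pvFF pattern (2 * y + 1) m = pvFF pattern (2 * y + 1) (y + 1) := by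
  intro m
  induction m with
  | zero => intro h; omega
  | succ m ih =>
      intro h
      by_cases he : y + 1 = m + 1
      · rw [he]
      · have hm : y + 1 ≤ m := by omega
        rw [pvFF, ih hm]
        have : ¬ (m + (m + 1) ≤ 2 * y + 1 ∧
            2 * y + 1 < m + (m + 1) + (pattern.length - (m + 1))) := by omega
        simp [this]

theorem pvFF_eq_GG (pattern : List (List Char)) (y : Nat) (hy : y < pattern.length - 1) :
    ∀ m : Nat, m ≤ y + 1 → pvFF pattern (2 * y + 1) m = pvGG pattern y m := by
  intro m
  induction m with
  | zero => intro _; rfl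
  | succ m ih =>
      intro h
      rw [pvFF, pvGG, ih (by omega)]
      have hle : m ≤ y := by omega
      have hmn : m + 1 ≤ pattern.length := by omega
      have hcond : (m + (m + 1) ≤ 2 * y + 1 ∧
          2 * y + 1 < m + (m + 1) + (pattern.length - (m + 1))) ↔
          (2 * y + 1 < m + pattern.length) := by omega
      by_cases hc : 2 * y + 1 < m + pattern.length
      · rw [if_pos (hcond.mpr hc), if_pos hc]
      · rw [if_neg (fun hh => hc (hcond.mp hh)), if_neg hc]

-- the uncapped trajectory sum is a pvGG prefix
theorem pvUsum_GG (pattern : List (List Char)) (y : Nat) :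
    ∀ (m y2 : Nat) (y1 : Int), pattern.length - y2 ≤ m → y1 + y2 = 2 * y + 1 → y1 ≤ (y : Int) →
      pvUsum pattern y1 y2 = pvGG pattern y ((y1 + 1).toNat) := by
  intro m
  induction m with
  | zero =>
      intro y2 y1 hm hinv hle
      have hg : ¬ (0 ≤ y1 ∧ y2 < pattern.length) := by omega
      rw [pvUsum, dif_neg hg]
      rcases lt_or_ge y1 0 with hneg | hpos
      · have : (y1 + 1).toNat = 0 := by omega
        rw [this]; rfl
      · have hyn : y2 ≥ pattern.length := by omega
        rw [eq_comm]
        apply pvGG_zero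
        intro i hi
        omega
  | succ m ih =>
      intro y2 y1 hm hinv hle
      rw [pvUsum]
      by_cases hg : 0 ≤ y1 ∧ y2 < pattern.length
      · rw [dif_pos hg]
        have ht1 : (y1 + 1).toNat = y1.toNat + 1 := by omega
        have ht2 : ((y1 - 1) + 1).toNat = y1.toNat := by omega
        rw [ih (y2 + 1) (y1 - 1) (by omega) (by omega) (by omega), ht2, ht1, pvGG]
        have hc : 2 * y + 1 < y1.toNat + pattern.length := by omega
        have hk : 2 * y + 1 - y1.toNat = y2 := by omega
        rw [if_pos hc, hk]
        omega
      · rw [dif_neg hg]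
        rcases lt_or_ge y1 0 with hneg | hpos
        · have : (y1 + 1).toNat = 0 := by omega
          rw [this]; rfl
        · have hyn : y2 ≥ pattern.length := by omega
          rw [eq_comm]
          apply pvGG_zero
          intro i hi
          omega

-- the diag table at the odd anti-diagonal 2y+1 is the uncapped trajectory sum
theorem pvDiag_getD (pattern : List (List Char)) (y : Nat) (hy : y < pattern.length - 1) :
    (pvDiagBuild pattern).getD (2 * y + 1) 0 = pvUsum pattern (y : Int) (y + 1) := by
  have hk : 2 * y + 1 < (List.replicate (2 * pattern.length) (0 : Nat)).length := by
    simp; omega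
  rw [pvDiagBuild_eq,
    pvBump_foldl (2 * y + 1) (pvUps pattern) (List.replicate (2 * pattern.length) 0) hk
      (by intro p hp; simpa using pvUps_mem pattern p hp)]
  have hrep : (List.replicate (2 * pattern.length) (0 : Nat)).getD (2 * y + 1) 0 = 0 := by
    simp [List.getD]
  rw [hrep, pvUps, pvKeySum_ups pattern (2 * y + 1) pattern.length]
  rw [pvFF_stable pattern y pattern.length (by omega),
    pvFF_eq_GG pattern y hy (y + 1) (by omega)]
  rw [pvUsum_GG pattern y pattern.length (y + 1) (y : Int) (by omega) (by omega) (by omega)]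
  simp

-- B's find?-scan equals the canonical scan
theorem pvFind_ref (pattern : List (List Char)) :
    ∀ (m s : Nat), pattern.length - 1 - s = m →
      (match (List.range' s m).find?
          (fun y => (pvDiagBuild pattern).getD (2 * y + 1) 0 == 1) with
        | some y => y + 1
        | none => 0) = pvRef pattern s := by
  intro m
  induction m with
  | zero =>
      intro s hs
      have : ¬ s < pattern.length - 1 := by omega
      rw [pvRef, if_neg this]
      rfl
  | succ m ih =>
      intro s hs
      have hlt : s < pattern.length - 1 := by omega
      rw [List.range'_succ, List.find?_cons, pvRef, if_pos hlt]
      have hiff : ((pvDiagBuild pattern).getD (2 * s + 1) 0 == 1) = true ↔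
          pvTsum pattern (s : Int) (s + 1) = 1 := by
        rw [pvDiag_getD pattern s hlt, beq_iff_eq]
        exact ((pvCap_sum pattern pattern.length (s + 1) (s : Int) (by omega)).2).symm
      by_cases hc : pvTsum pattern (s : Int) (s + 1) = 1
      · rw [if_pos hc]
        have : ((pvDiagBuild pattern).getD (2 * s + 1) 0 == 1) = true := hiff.mpr hc
        rw [this]
      · rw [if_neg hc]
        have : ((pvDiagBuild pattern).getD (2 * s + 1) 0 == 1) = false := by
          cases hb : ((pvDiagBuild pattern).getD (2 * s + 1) 0 == 1) with
          | false => rfl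
          | true => exact absurd (hiff.mp hb) hc
        rw [this]
        exact ih (s + 1) (by omega)

theorem pvMirror_ref (pattern : List (List Char)) : pvMirror pattern = pvRef pattern 0 := by
  rw [pvMirror]
  have : List.range (pattern.length - 1) = List.range' 0 (pattern.length - 1) := by
    rw [List.range_eq_range']
  rw [this]
  exact pvFind_ref pattern (pattern.length - 1) 0 (by omega)

theorem pvStep_eq (s : Int) (patternS : List String) :
    (let pattern := patternS.map String.toList
     let rh := find_reflection pattern 100 true
     if rh.1 then s + rh.2
     else
       let pattern2 := pvTransposeRev pattern
       let rv := find_reflection pattern2 1 true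
       if rv.1 then s + rv.2 else s)
    = (let pattern := patternS.map String.toList
       let h := pvMirror pattern
       if h ≠ 0 then s + 100 * (h : Int)
       else s + (pvMirror (pvTransposeRev pattern) : Int)) := by
  simp only [pvFr_eq, pvMirror_ref]
  by_cases h0 : pvRef (patternS.map String.toList) 0 = 0
  · simp only [h0, if_pos rfl]
    by_cases hv : pvRef (pvTransposeRev (patternS.map String.toList)) 0 = 0 <;>
      simp [h0, hv]
  · simp [h0]

-- ===== VERDICT (by name: the statement is the Claim_ definition above) =====
theorem part_two_spec : Claim_equal_part_two := by
  intro _input _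
  unfold Spec_part_two part_two part_two_alt
  congr 1
  funext s p
  exact pvStep_eq s p
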